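-- pv_equiv track=rewrite | github.com/DFNaiff/DiffSci2 | scripts/0005d-porosity-field-new-metrics-evaluator-large-subvol.py | get_subvolume_slices
-- ===== SOURCE A (Python) =====
-- def get_subvolume_slices(total_z, subcube_size, stride):
--     """
--     Return subvolume slices along z.
--
--     For stride=1024: 4 non-overlapping subvolumes
--     For stride=512:  7 half-overlapping subvolumes
--     """
--     slices = []
--     z = 0
--     idx = 0
--     while z + subcube_size <= total_z:
--         slices.append((idx, z, z + subcube_size))
--         z += stride
--         idx += 1
--     return slices
-- ===== SOURCE B (Python) =====
-- def get_subvolume_slices(total_z, subcube_size, stride):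
--     if total_z < subcube_size:
--         return []
--     n = (total_z - subcube_size) // stride + 1
--     return [(i, i * stride, i * stride + subcube_size) for i in range(n)]
-- ===== Notes on version B (the rewrite author's own statement) =====
-- stated objective: simpler
-- what changed: Replaced the while-loop that accumulates slices until z overruns with a closed-form slice count (total_z - subcube_size) // stride + 1 and an index-driven comprehension.
import Mathlib
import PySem

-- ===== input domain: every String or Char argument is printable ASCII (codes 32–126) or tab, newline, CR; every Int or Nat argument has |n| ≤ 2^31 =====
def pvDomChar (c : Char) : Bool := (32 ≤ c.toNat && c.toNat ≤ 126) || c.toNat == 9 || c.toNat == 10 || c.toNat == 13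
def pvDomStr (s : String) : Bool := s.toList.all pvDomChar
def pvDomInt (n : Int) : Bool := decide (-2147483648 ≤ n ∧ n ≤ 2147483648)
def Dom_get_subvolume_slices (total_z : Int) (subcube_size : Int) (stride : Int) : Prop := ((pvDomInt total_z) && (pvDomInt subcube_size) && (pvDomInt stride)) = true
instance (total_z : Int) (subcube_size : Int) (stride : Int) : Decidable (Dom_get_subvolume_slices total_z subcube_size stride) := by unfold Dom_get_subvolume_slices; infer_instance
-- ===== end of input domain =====

-- B replaces A's while-loop with a closed-form slice count plus an index-driven list
-- construction (objective: simpler).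

-- ===== PORT A =====
-- The while loop of A: guard carries '0 < stride' ONLY as a totality guard — where
-- stride ≤ 0 and the loop guard holds, the Python diverges (excluded by Pre_ below),
-- and this port returns [] there; on Pre_ it is a step-for-step transcription.
def pvLoopA (total_z subcube_size stride z idx : Int) : List (Int × Int × Int) :=
  if h : z + subcube_size ≤ total_z ∧ 0 < stride then
    (idx, z, z + subcube_size) :: pvLoopA total_z subcube_size stride (z + stride) (idx + 1)
  else []
termination_by (total_z - subcube_size - z + 1).toNat
decreasing_by
  obtain ⟨h1, h2⟩ := h
  omega

def get_subvolume_slices (total_z : Int) (subcube_size : Int) (stride : Int) : List (Int × Int × Int) :=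
  pvLoopA total_z subcube_size stride 0 0

-- ===== PORT B =====
def get_subvolume_slices_alt (total_z : Int) (subcube_size : Int) (stride : Int) : List (Int × Int × Int) :=
  if total_z < subcube_size then []
  else
    (PySem.List.pyRange 0 (PySem.Int.floordiv (total_z - subcube_size) stride + 1) 1).map
      (fun i => (i, i * stride, i * stride + subcube_size))

-- ===== PRECONDITION & SPEC =====
-- Pre_ excludes exactly the inputs on which Python A never returns: stride ≤ 0 while the
-- loop guard 0 + subcube_size ≤ total_z holds makes A loop forever.
def Pre_get_subvolume_slices (total_z : Int) (subcube_size : Int) (stride : Int) : Prop :=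
  0 < stride ∨ total_z < subcube_size
instance (total_z : Int) (subcube_size : Int) (stride : Int) : Decidable (Pre_get_subvolume_slices total_z subcube_size stride) := by unfold Pre_get_subvolume_slices; infer_instance

def pvWitness_get_subvolume_slices : Int × Int × Int := (10, 4, 3)

def Spec_get_subvolume_slices (total_z : Int) (subcube_size : Int) (stride : Int) (out : List (Int × Int × Int)) : Prop := out = get_subvolume_slices_alt total_z subcube_size stride
instance (total_z : Int) (subcube_size : Int) (stride : Int) (out : List (Int × Int × Int)) : Decidable (Spec_get_subvolume_slices total_z subcube_size stride out) := by unfold Spec_get_subvolume_slices; infer_instance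

-- ===== CLAIM (what is proved, stated in full; the proofs are below) =====
def Claim_equal_get_subvolume_slices : Prop := ∀ (total_z : Int) (subcube_size : Int) (stride : Int), Dom_get_subvolume_slices total_z subcube_size stride → Pre_get_subvolume_slices total_z subcube_size stride → Spec_get_subvolume_slices total_z subcube_size stride (get_subvolume_slices total_z subcube_size stride)

-- ===== LEMMAS AND PROOFS =====

-- A's loop, for positive stride, produces exactly N indexed slices, where N is the
-- closed-form count from position z.
theorem pvLoopA_eq (t s st : Int) (hst : 0 < st) :
    ∀ (N : Nat) (z idx : Int),
      (if z + s ≤ t then ((t - s - z) / st + 1).toNat else 0) = N →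
      pvLoopA t s st z idx
        = (List.range N).map
            (fun k : Nat => ((idx + k : Int), (z + k * st : Int), (z + k * st + s : Int))) := by
  intro N
  induction N with
  | zero =>
    intro z idx hN
    have hgt : ¬ (z + s ≤ t) := by
      intro hle
      rw [if_pos hle] at hN
      have h0 : 0 ≤ (t - s - z) / st := Int.ediv_nonneg (by omega) (by omega)
      omega
    rw [pvLoopA]
    simp [hgt]
  | succ N ih =>
    intro z idx hN
    have hle : z + s ≤ t := by
      by_contra hgt
      rw [if_neg hgt] at hN
      omega
    rw [pvLoopA, dif_pos ⟨hle, hst⟩]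
    have hrec : (if z + st + s ≤ t then ((t - s - (z + st)) / st + 1).toNat else 0) = N := by
      rw [if_pos hle] at hN
      by_cases h2 : z + st + s ≤ t
      · rw [if_pos h2]
        have : t - s - (z + st) = (t - s - z) + (-1) * st := by ring
        rw [this, Int.add_mul_ediv_right _ _ (by omega : st ≠ 0)]
        have h0 : 0 ≤ (t - s - (z + st)) / st := Int.ediv_nonneg (by omega) (by omega)
        rw [this, Int.add_mul_ediv_right _ _ (by omega : st ≠ 0)] at h0
        omega
      · rw [if_neg h2]
        have hz : (t - s - z) / st = 0 :=
          Int.ediv_eq_zero_of_lt (by omega) (by omega)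
        omega
    rw [ih (z + st) (idx + 1) hrec]
    rw [List.range_succ_eq_map, List.map_cons, List.map_map]
    refine congrArg₂ _ (by simp) (List.map_congr_left ?_)
    intro k _
    simp only [Function.comp_apply, Nat.succ_eq_add_one]
    push_cast
    refine Prod.ext (by ring) (Prod.ext (by ring) (by ring))

-- ===== VERDICT (by name: the statement is the Claim_ definition above) =====
theorem get_subvolume_slices_spec : Claim_equal_get_subvolume_slices := by
  unfold Claim_equal_get_subvolume_slices
  intro t s st _ hpre
  unfold Spec_get_subvolume_slices get_subvolume_slices get_subvolume_slices_alt
  by_cases hts : t < s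
  · rw [if_pos hts, pvLoopA]
    simp
    omega
  · rcases hpre with hst | hst
    · rw [if_neg hts]
      have hfd : PySem.Int.floordiv (t - s) st = (t - s) / st :=
        PySem.Int.floordiv_eq_ediv_of_pos hst
      have hcnt : (if (0:Int) + s ≤ t then ((t - s - 0) / st + 1).toNat else 0)
          = ((t - s) / st + 1).toNat := by
        rw [if_pos (by omega)]; norm_num
      rw [pvLoopA_eq t s st hst _ 0 0 hcnt]
      rw [hfd, PySem.List.pyRange_one]
      have h0 : 0 ≤ (t - s) / st := Int.ediv_nonneg (by omega) (by omega)
      rw [List.map_map]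
      have : ((t - s) / st + 1 - 0).toNat = ((t - s) / st + 1).toNat := by omega
      rw [this]
      refine List.map_congr_left ?_
      intro k _
      simp only [Function.comp_apply]
      refine Prod.ext (by ring) (Prod.ext (by ring) (by ring))
    · omega
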